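-- pv_equiv track=rewrite | github.com/BigDonalds/LHDiff-Project | lh_diff/matcher.py | _analyze_control_flow
-- ===== SOURCE A (Python) =====
-- from typing import List, Dict, Tuple, Set, Optional
--
-- def _analyze_control_flow(method_lines: List[str]) -> Dict[str, int]:
--     """
--     Extracts features related to code complexity and control flow.
--     """
--     flow_patterns = {
--         'early_returns': 0,
--         'conditional_blocks': 0,
--         'nested_blocks': 0,
--         'null_checks': 0,
--         'assignments': 0
--     }
--
--     brace_level = 0
--     in_conditional = False
--
--     for line in method_lines:
--         stripped = line.strip()
--
--         # Detect returns inside blocks (not at top level)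
--         if 'return' in stripped and brace_level > 0:
--             flow_patterns['early_returns'] += 1
--
--         # Detect control structures
--         if any(keyword in stripped for keyword in ['if', 'else', 'for', 'while']):
--             flow_patterns['conditional_blocks'] += 1
--             in_conditional = True
--
--         # Detect null checks (Java-style)
--         if '!= null' in stripped or '== null' in stripped:
--             flow_patterns['null_checks'] += 1
--
--         # Detect assignments
--         if '=' in stripped and not stripped.startswith('if') and not stripped.startswith('while'):
--             flow_patterns['assignments'] += 1
--
--         # Track nesting level
--         brace_level += line.count('{')
--         brace_level -= line.count('}')
--
--     return flow_patterns
-- ===== SOURCE B (Python) =====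
-- from typing import List, Dict
--
-- def _analyze_control_flow(method_lines: List[str]) -> Dict[str, int]:
--     """Prefix-brace-level table + independent per-feature aggregations."""
--     stripped = [line.strip() for line in method_lines]
--     levels = [0]
--     for line in method_lines:
--         levels.append(levels[-1] + line.count('{') - line.count('}'))
--     return {
--         'early_returns': sum(1 for s, lev in zip(stripped, levels)
--                              if 'return' in s and lev > 0),
--         'conditional_blocks': sum(1 for s in stripped
--                                   if any(k in s for k in ('if', 'else', 'for', 'while'))),
--         'nested_blocks': 0,
--         'null_checks': sum(1 for s in stripped if '!= null' in s or '== null' in s),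
--         'assignments': sum(1 for s in stripped
--                            if '=' in s and not s.startswith('if') and not s.startswith('while')),
--     }
-- ===== Notes on version B (the rewrite author's own statement) =====
-- stated objective: alternative
-- what changed: Replaces A's single stateful sweep that mutates one dict (threading brace_level and in_conditional) with a prefix brace-level table plus five independent per-feature aggregations over the stripped lines, assembling the result dict at the end.
import Mathlib
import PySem

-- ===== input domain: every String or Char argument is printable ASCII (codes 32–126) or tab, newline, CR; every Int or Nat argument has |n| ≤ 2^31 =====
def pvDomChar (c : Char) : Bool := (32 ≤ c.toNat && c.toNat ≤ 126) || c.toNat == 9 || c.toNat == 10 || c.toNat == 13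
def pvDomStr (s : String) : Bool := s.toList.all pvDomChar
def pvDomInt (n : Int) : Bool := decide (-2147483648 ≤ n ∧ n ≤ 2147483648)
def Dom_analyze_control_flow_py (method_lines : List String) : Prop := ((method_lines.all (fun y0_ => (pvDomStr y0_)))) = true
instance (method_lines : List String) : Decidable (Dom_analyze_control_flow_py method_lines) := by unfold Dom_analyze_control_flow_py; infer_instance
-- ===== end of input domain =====

-- B recomputes the same five counts from a prefix brace-level table with independent
-- per-feature aggregations instead of A's single stateful sweep over a mutated dict
-- (objective: alternative decomposition, same cost).

-- ===== PORT A =====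
-- loop body of A's single sweep (fp, brace_level, in_conditional)
def stepA (st : PySem.Dict String Int × Int × Bool) (line : String) :
    PySem.Dict String Int × Int × Bool :=
  let fp := st.1
  let brace_level := st.2.1
  let in_conditional := st.2.2
  let stripped := PySem.Str.strip line
  let fp := if PySem.Str.isIn "return" stripped && decide (0 < brace_level) then
      fp.modify "early_returns" 0 (· + 1) else fp
  let res := if PySem.Str.isIn "if" stripped || PySem.Str.isIn "else" stripped ||
        PySem.Str.isIn "for" stripped || PySem.Str.isIn "while" stripped then
      (fp.modify "conditional_blocks" 0 (· + 1), true) else (fp, in_conditional)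
  let fp := res.1
  let in_conditional := res.2
  let fp := if PySem.Str.isIn "!= null" stripped || PySem.Str.isIn "== null" stripped then
      fp.modify "null_checks" 0 (· + 1) else fp
  let fp := if PySem.Str.isIn "=" stripped && !PySem.Str.startswith stripped "if" &&
        !PySem.Str.startswith stripped "while" then
      fp.modify "assignments" 0 (· + 1) else fp
  let brace_level := brace_level + (PySem.Str.count line "{" : Int)
  let brace_level := brace_level - (PySem.Str.count line "}" : Int)
  (fp, brace_level, in_conditional)

def analyze_control_flow_py (method_lines : List String) : List (String × Int) :=
  let flow_patterns : PySem.Dict String Int :=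
    ((((PySem.Dict.empty.insert "early_returns" 0).insert "conditional_blocks" 0).insert
        "nested_blocks" 0).insert "null_checks" 0).insert "assignments" 0
  (method_lines.foldl stepA (flow_patterns, 0, false)).1.items

-- ===== PORT B =====
-- B's per-line predicates ('return' in s / any(k in s …) / null checks / assignment test)
def erP (p : String × Int) : Bool := PySem.Str.isIn "return" p.1 && decide (0 < p.2)
def cbP (s : String) : Bool := PySem.Str.isIn "if" s || PySem.Str.isIn "else" s ||
  PySem.Str.isIn "for" s || PySem.Str.isIn "while" s
def ncP (s : String) : Bool := PySem.Str.isIn "!= null" s || PySem.Str.isIn "== null" s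
def asP (s : String) : Bool := PySem.Str.isIn "=" s && !PySem.Str.startswith s "if" &&
  !PySem.Str.startswith s "while"

def analyze_control_flow_py_alt (method_lines : List String) : List (String × Int) :=
  let stripped := method_lines.map PySem.Str.strip
  let levels := (method_lines.foldl
      (fun (p : List Int × Int) line =>
        let lev := p.2 + (PySem.Str.count line "{" : Int) - (PySem.Str.count line "}" : Int)
        (p.1 ++ [lev], lev))
      ([0], 0)).1
  let early_returns : Int := ((stripped.zip levels).countP erP : Nat)
  let conditional_blocks : Int := (stripped.countP cbP : Nat)
  let null_checks : Int := (stripped.countP ncP : Nat)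
  let assignments : Int := (stripped.countP asP : Nat)
  [("early_returns", early_returns), ("conditional_blocks", conditional_blocks),
   ("nested_blocks", 0), ("null_checks", null_checks), ("assignments", assignments)]

-- ===== PRECONDITION & SPEC =====
def Spec_analyze_control_flow_py (method_lines : List String) (out : List (String × Int)) : Prop := out = analyze_control_flow_py_alt method_lines
instance (method_lines : List String) (out : List (String × Int)) : Decidable (Spec_analyze_control_flow_py method_lines out) := by unfold Spec_analyze_control_flow_py; infer_instance

-- ===== CLAIM (what is proved, stated in full; the proofs are below) =====
def Claim_equal_analyze_control_flow_py : Prop := ∀ (method_lines : List String), Dom_analyze_control_flow_py method_lines → Spec_analyze_control_flow_py method_lines (analyze_control_flow_py method_lines)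

-- ===== LEMMAS AND PROOFS =====

-- the five-key dict A threads through its sweep
def dict5 (e c n nl a : Int) : PySem.Dict String Int :=
  ((((PySem.Dict.empty.insert "early_returns" e).insert "conditional_blocks" c).insert
      "nested_blocks" n).insert "null_checks" nl).insert "assignments" a

-- per-line brace delta and the running early-return count at running brace level
def dLine (line : String) : Int :=
  (PySem.Str.count line "{" : Int) - (PySem.Str.count line "}" : Int)

def erC : List String → Int → Int
  | [], _ => 0
  | l :: ls, lev =>
    (if erP (PySem.Str.strip l, lev) then 1 else 0) + erC ls (lev + dLine l)

-- the brace levels AFTER each line, starting from lev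
def levF : List String → Int → List Int
  | [], _ => []
  | l :: ls, lev => (lev + dLine l) :: levF ls (lev + dLine l)

lemma mod_er (e c n nl a : Int) :
    (dict5 e c n nl a).modify "early_returns" 0 (· + 1) = dict5 (e + 1) c n nl a := by
  simp [dict5, PySem.Dict.modify, PySem.Dict.insert, PySem.Dict.empty, PySem.Dict.getD, PySem.Dict.get?]

lemma mod_cb (e c n nl a : Int) :
    (dict5 e c n nl a).modify "conditional_blocks" 0 (· + 1) = dict5 e (c + 1) n nl a := by
  simp [dict5, PySem.Dict.modify, PySem.Dict.insert, PySem.Dict.empty, PySem.Dict.getD, PySem.Dict.get?]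

lemma mod_nc (e c n nl a : Int) :
    (dict5 e c n nl a).modify "null_checks" 0 (· + 1) = dict5 e c n (nl + 1) a := by
  simp [dict5, PySem.Dict.modify, PySem.Dict.insert, PySem.Dict.empty, PySem.Dict.getD, PySem.Dict.get?]

lemma mod_as (e c n nl a : Int) :
    (dict5 e c n nl a).modify "assignments" 0 (· + 1) = dict5 e c n nl (a + 1) := by
  simp [dict5, PySem.Dict.modify, PySem.Dict.insert, PySem.Dict.empty, PySem.Dict.getD, PySem.Dict.get?]

lemma items_dict5 (e c n nl a : Int) :
    (dict5 e c n nl a).items =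
      [("early_returns", e), ("conditional_blocks", c), ("nested_blocks", n),
       ("null_checks", nl), ("assignments", a)] := by
  simp [dict5, PySem.Dict.insert, PySem.Dict.empty]

lemma stepA_dict5 (e c n nl a lev : Int) (b : Bool) (line : String) :
    stepA (dict5 e c n nl a, lev, b) line =
      (dict5 (e + if erP (PySem.Str.strip line, lev) then 1 else 0)
             (c + if cbP (PySem.Str.strip line) then 1 else 0)
             n
             (nl + if ncP (PySem.Str.strip line) then 1 else 0)
             (a + if asP (PySem.Str.strip line) then 1 else 0),
       lev + (PySem.Str.count line "{" : Int) - (PySem.Str.count line "}" : Int),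
       if cbP (PySem.Str.strip line) then true else b) := by
  simp only [stepA, erP, cbP, ncP, asP]
  split_ifs <;> simp_all [mod_er, mod_cb, mod_nc, mod_as]

lemma foldA_items (lines : List String) : ∀ (e c n nl a lev : Int) (b : Bool),
    ((lines.foldl stepA (dict5 e c n nl a, lev, b)).1).items =
      [("early_returns", e + erC lines lev),
       ("conditional_blocks", c + ((lines.map PySem.Str.strip).countP cbP : Int)),
       ("nested_blocks", n),
       ("null_checks", nl + ((lines.map PySem.Str.strip).countP ncP : Int)),
       ("assignments", a + ((lines.map PySem.Str.strip).countP asP : Int))] := by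
  induction lines with
  | nil => intro e c n nl a lev b; simp [items_dict5, erC]
  | cons l ls ih =>
    intro e c n nl a lev b
    rw [List.foldl_cons, stepA_dict5, ih]
    simp only [erC, dLine, List.map_cons, List.countP_cons, List.cons.injEq, Prod.mk.injEq]
    push_cast
    and_intros <;> (try trivial) <;> (try rw [add_sub_assoc]) <;> ring

lemma levels_foldl (lines : List String) : ∀ (acc : List Int) (lev : Int),
    (lines.foldl
      (fun (p : List Int × Int) line =>
        let l := p.2 + (PySem.Str.count line "{" : Int) - (PySem.Str.count line "}" : Int)
        (p.1 ++ [l], l))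
      (acc, lev)).1 = acc ++ levF lines lev := by
  induction lines with
  | nil => intro acc lev; simp [levF]
  | cons l ls ih =>
    intro acc lev
    rw [List.foldl_cons]
    simp only []
    rw [ih]
    simp [levF, dLine, sub_eq_add_neg, add_assoc]

lemma zip_countP_erC (lines : List String) : ∀ (lev : Int),
    (((lines.map PySem.Str.strip).zip (lev :: levF lines lev)).countP erP : Int) =
      erC lines lev := by
  induction lines with
  | nil => intro lev; simp [erC]
  | cons l ls ih =>
    intro lev
    simp only [List.map_cons, levF, List.zip_cons_cons, List.countP_cons, erC]
    rw [← ih (lev + dLine l)]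
    push_cast
    ring

-- ===== VERDICT (by name: the statement is the Claim_ definition above) =====
theorem analyze_control_flow_py_spec : Claim_equal_analyze_control_flow_py := by
  intro method_lines _
  show analyze_control_flow_py method_lines = analyze_control_flow_py_alt method_lines
  unfold analyze_control_flow_py analyze_control_flow_py_alt
  rw [show ((((PySem.Dict.empty.insert "early_returns" (0:Int)).insert "conditional_blocks" 0).insert
        "nested_blocks" 0).insert "null_checks" 0).insert "assignments" 0 = dict5 0 0 0 0 0 from rfl,
      foldA_items]
  simp only [levels_foldl, List.singleton_append, zip_countP_erC, zero_add]
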